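-- pv_equiv track=rewrite | github.com/djlarbear/larlbot-dashboard | betting/scripts/espn_score_fetcher.py | match_game_to_bet
-- ===== SOURCE A (Python) =====
-- def match_game_to_bet(espn_matchup, bet_game):
--     """
--     Try to match ESPN game to our bet game
--     Returns: True if matched, False otherwise
--     """
--
--     # Extract school names (first word before first space usually)
--     def extract_schools(s):
--         # Handle "Team Name @ Team Name" format
--         if '@' in s:
--             away, home = s.split('@')
--         else:
--             return []
--
--         # Get first significant word from each
--         def get_school_name(team):
--             # Handle special cases
--             team = team.strip()
--             if 'State' in team:
--                 # e.g., "North Carolina State" or "Florida State"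
--                 parts = team.split()
--                 if len(parts) >= 2:
--                     return parts[0] + ' ' + parts[1]
--             # Just get first word for most teams
--             return team.split()[0] if team else ''
--
--         away_school = get_school_name(away)
--         home_school = get_school_name(home)
--         return {away_school.lower(), home_school.lower()}
--
--     espn_schools = extract_schools(espn_matchup)
--     bet_schools = extract_schools(bet_game)
--
--     # If we found both sets of schools, compare
--     if espn_schools and bet_schools and espn_schools == bet_schools:
--         return True
--
--     # Fallback: check if names contain the same key words
--     espn_lower = espn_matchup.lower()
--     bet_lower = bet_game.lower()
--
--     # Check if major school names appear in both
--     for word in bet_lower.split():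
--         if len(word) > 3 and word in espn_lower:
--             # Found a matching word, might be the same game
--             # Try to confirm with a second school name
--             for word2 in bet_lower.split():
--                 if word2 != word and len(word2) > 3 and word2 in espn_lower:
--                     return True
--
--     return False
-- ===== SOURCE B (Python) =====
-- def match_game_to_bet(espn_matchup, bet_game):
--     """Same matcher, restructured: Option-style school extraction and a
--     set-cardinality fallback instead of the quadratic nested word scan."""
--
--     def schools(s):
--         if '@' not in s:
--             return None
--         parts = s.split('@')
--         if len(parts) != 2:
--             return None
--
--         def name(t):
--             t = t.strip()
--             words = t.split()
--             if not words:
--                 return ''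
--             if len(words) >= 2 and 'State' in t:
--                 return ' '.join(words[:2])
--             return words[0]
--
--         return {name(p).lower() for p in parts}
--
--     espn_schools = schools(espn_matchup)
--     bet_schools = schools(bet_game)
--     if espn_schools is not None and bet_schools is not None and espn_schools == bet_schools:
--         return True
--
--     espn_lower = espn_matchup.lower()
--     matching = {w for w in bet_game.lower().split()
--                 if len(w) > 3 and w in espn_lower}
--     return len(matching) >= 2
-- ===== Notes on version B (the rewrite author's own statement) =====
-- stated objective: alternative
-- what changed: School extraction becomes an Option-returning helper with an explicit two-part check, and the fallback's quadratic nested word scan is replaced by one filtering pass that builds the set of distinct long bet-words occurring in the ESPN string and tests its cardinality >= 2.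
import Mathlib
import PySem

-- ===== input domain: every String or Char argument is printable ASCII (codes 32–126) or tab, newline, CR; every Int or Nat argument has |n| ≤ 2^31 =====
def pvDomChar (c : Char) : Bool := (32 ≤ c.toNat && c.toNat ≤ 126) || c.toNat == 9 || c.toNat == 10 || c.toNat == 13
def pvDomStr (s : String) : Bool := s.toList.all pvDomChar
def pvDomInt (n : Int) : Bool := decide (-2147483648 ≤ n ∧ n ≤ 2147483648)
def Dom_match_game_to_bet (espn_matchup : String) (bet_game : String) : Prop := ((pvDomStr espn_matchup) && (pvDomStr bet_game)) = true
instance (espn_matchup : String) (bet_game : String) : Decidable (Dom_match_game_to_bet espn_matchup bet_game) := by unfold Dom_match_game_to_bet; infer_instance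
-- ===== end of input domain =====

-- B restructures A's matcher: Option-style school extraction and a set-cardinality
-- fallback replacing the quadratic nested word scan (objective: alternative).


-- ===== PORT A =====
-- get_school_name (A's inner helper)
def pvGetSchoolName (team : List Char) : List Char :=
  let team := PySem.Chars.strip team
  if PySem.Chars.isIn "State".toList team then
    match PySem.Chars.split₀ team with
    | p0 :: p1 :: _ => p0 ++ [' '] ++ p1
    | _ => if team ≠ [] then (PySem.Chars.split₀ team).headD [] else []
  else if team ≠ [] then (PySem.Chars.split₀ team).headD [] else []

-- extract_schools; none models both the '[]' return (no '@') and, outside Pre_,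
-- the ValueError of 'away, home = s.split('@')' when there are ≥ 2 '@'
def pvExtractSchools (s : List Char) : Option (PySem.Set (List Char)) :=
  if PySem.Chars.isIn ['@'] s then
    match PySem.Chars.splitOn s ['@'] with
    | [away, home] =>
        some (PySem.Set.ofList
          [PySem.Chars.lower (pvGetSchoolName away), PySem.Chars.lower (pvGetSchoolName home)])
    | _ => none
  else none

-- A's fallback: nested scan over the words of bet_lower
def pvFallbackA (e b : List Char) : Bool :=
  let espn_lower := PySem.Chars.lower e
  let ws := PySem.Chars.split₀ (PySem.Chars.lower b)
  ws.any (fun word =>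
    decide (3 < word.length) && PySem.Chars.isIn word espn_lower &&
      ws.any (fun word2 =>
        !(word2 == word) && decide (3 < word2.length) && PySem.Chars.isIn word2 espn_lower))

def match_game_to_bet (espn_matchup : String) (bet_game : String) : Bool :=
  let espn_schools := pvExtractSchools espn_matchup.toList
  let bet_schools := pvExtractSchools bet_game.toList
  match espn_schools, bet_schools with
  | some es, some bs =>
      if PySem.Set.equal es bs then true
      else pvFallbackA espn_matchup.toList bet_game.toList
  | _, _ => pvFallbackA espn_matchup.toList bet_game.toList

-- ===== PORT B =====
-- B's name helper
def pvName (t : List Char) : List Char :=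
  let t := PySem.Chars.strip t
  let words := PySem.Chars.split₀ t
  match words with
  | [] => []
  | w :: _ =>
      if decide (2 ≤ words.length) && PySem.Chars.isIn "State".toList t then
        PySem.Chars.join [' '] (words.take 2)
      else w

-- B's schools helper (None modelled as none)
def pvSchools (s : List Char) : Option (PySem.Set (List Char)) :=
  if PySem.Chars.isIn ['@'] s then
    let parts := PySem.Chars.splitOn s ['@']
    if parts.length = 2 then
      some (PySem.Set.ofList (parts.map (fun p => PySem.Chars.lower (pvName p))))
    else none
  else none

-- B's fallback: one filtering pass building a set, then its cardinality
def pvFallbackB (e b : List Char) : Bool :=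
  let espn_lower := PySem.Chars.lower e
  let matching := PySem.Set.ofList
    ((PySem.Chars.split₀ (PySem.Chars.lower b)).filter
      (fun w => decide (3 < w.length) && PySem.Chars.isIn w espn_lower))
  decide ((2 : Int) ≤ PySem.Set.len matching)

def match_game_to_bet_alt (espn_matchup : String) (bet_game : String) : Bool :=
  let espn_schools := pvSchools espn_matchup.toList
  let bet_schools := pvSchools bet_game.toList
  if espn_schools.isSome && bet_schools.isSome
      && PySem.Set.equal (espn_schools.getD []) (bet_schools.getD []) then true
  else pvFallbackB espn_matchup.toList bet_game.toList

-- ===== PRECONDITION & SPEC =====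
-- Pre_ excludes exactly the inputs where A raises ValueError: a string containing
-- '@' twice or more makes "away, home = s.split('@')" fail to unpack.
def Pre_match_game_to_bet (espn_matchup : String) (bet_game : String) : Prop :=
  PySem.Str.count espn_matchup "@" ≤ 1 ∧ PySem.Str.count bet_game "@" ≤ 1
instance (espn_matchup : String) (bet_game : String) : Decidable (Pre_match_game_to_bet espn_matchup bet_game) := by unfold Pre_match_game_to_bet; infer_instance

def pvWitness_match_game_to_bet : String × String := ("NC State @ Duke", "NC State @ Duke Blue Devils")

def Spec_match_game_to_bet (espn_matchup : String) (bet_game : String) (out : Bool) : Prop := out = match_game_to_bet_alt espn_matchup bet_game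
instance (espn_matchup : String) (bet_game : String) (out : Bool) : Decidable (Spec_match_game_to_bet espn_matchup bet_game out) := by unfold Spec_match_game_to_bet; infer_instance

-- ===== CLAIM (what is proved, stated in full; the proofs are below) =====
def Claim_equal_match_game_to_bet : Prop := ∀ (espn_matchup : String) (bet_game : String), Dom_match_game_to_bet espn_matchup bet_game → Pre_match_game_to_bet espn_matchup bet_game → Spec_match_game_to_bet espn_matchup bet_game (match_game_to_bet espn_matchup bet_game)

-- ===== LEMMAS AND PROOFS =====

lemma pv_split₀_nil : PySem.Chars.split₀ ([] : List Char) = [] := rfl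

-- A's and B's name helpers agree on every team string
lemma pvName_eq (t : List Char) : pvGetSchoolName t = pvName t := by
  unfold pvGetSchoolName pvName
  set st := PySem.Chars.strip t with hst
  cases hs : PySem.Chars.split₀ st with
  | nil => simp [hs]
  | cons w rest =>
      have hne : st ≠ [] := by
        intro h; rw [h, pv_split₀_nil] at hs; exact (List.cons_ne_nil _ _) hs.symm
      cases rest with
      | nil => simp [hs, hne]
      | cons w2 r2 =>
          simp [hs, hne, PySem.Chars.join_cons_cons, PySem.Chars.join_singleton]

-- A's extract_schools and B's schools agree (as options) on every string
lemma pvExtract_eq (s : List Char) : pvExtractSchools s = pvSchools s := by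
  unfold pvExtractSchools pvSchools
  split_ifs with h
  · cases hp : PySem.Chars.splitOn s ['@'] with
    | nil => rfl
    | cons a l =>
        cases l with
        | nil => rfl
        | cons b l2 =>
            cases l2 with
            | nil => simp [pvName_eq]
            | cons c l3 => simp
  · rfl

-- a Nodup list has length ≥ 2 iff it holds two different elements
lemma pv_two_le_length {α : Type} (s : List α) (hnd : s.Nodup) :
    2 ≤ s.length ↔ ∃ a ∈ s, ∃ b ∈ s, b ≠ a := by
  constructor
  · intro h
    match s, hnd, h with
    | a :: b :: t, hnd, _ =>
        refine ⟨a, by simp, b, by simp, ?_⟩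
        intro hba; rw [hba] at hnd; simp at hnd
  · rintro ⟨a, ha, b, hb, hne⟩
    match s, ha, hb with
    | [x], ha, hb => simp at ha hb; rw [ha, hb] at hne; exact absurd rfl hne
    | x :: y :: t, _, _ => simp

-- the nested word scan finds a pair of distinct qualifying words
-- iff the set of qualifying words has at least two elements
lemma pvFallback_core (el : List Char) (ws : List (List Char)) :
    (ws.any (fun word =>
      decide (3 < word.length) && PySem.Chars.isIn word el &&
        ws.any (fun word2 =>
          !(word2 == word) && decide (3 < word2.length) && PySem.Chars.isIn word2 el)))
    = decide ((2 : Int) ≤ PySem.Set.len (PySem.Set.ofList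
        (ws.filter (fun w => decide (3 < w.length) && PySem.Chars.isIn w el)))) := by
  have hcast : ((2 : Int) ≤ PySem.Set.len (PySem.Set.ofList
      (ws.filter (fun w => decide (3 < w.length) && PySem.Chars.isIn w el))))
      ↔ 2 ≤ (PySem.Set.ofList
      (ws.filter (fun w => decide (3 < w.length) && PySem.Chars.isIn w el))).length := by
    show ((2 : Int) ≤ ((PySem.Set.ofList _).length : Int)) ↔ _
    exact_mod_cast Iff.rfl
  rw [Bool.eq_iff_iff]
  simp only [List.any_eq_true, Bool.and_eq_true, decide_eq_true_eq,
    Bool.not_eq_eq_eq_not, Bool.not_true, beq_eq_false_iff_ne]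
  rw [hcast, pv_two_le_length _ (PySem.Set.nodup_ofList _)]
  constructor
  · rintro ⟨w, hw, ⟨h3, hin⟩, w2, hw2, ⟨hne, h3'⟩, hin'⟩
    refine ⟨w, ?_, w2, ?_, hne⟩ <;>
      · rw [PySem.Set.mem_ofList, List.mem_filter]
        simp_all
  · rintro ⟨a, ha, b', hb', hne⟩
    rw [PySem.Set.mem_ofList, List.mem_filter] at ha hb'
    have hpa := ha.2; have hpb := hb'.2
    simp only [Bool.and_eq_true, decide_eq_true_eq] at hpa hpb
    exact ⟨a, ha.1, ⟨hpa.1, hpa.2⟩, b', hb'.1, ⟨hne, hpb.1⟩, hpb.2⟩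

lemma pvFallback_eq (e b : List Char) : pvFallbackA e b = pvFallbackB e b := by
  unfold pvFallbackA pvFallbackB
  exact pvFallback_core (PySem.Chars.lower e) (PySem.Chars.split₀ (PySem.Chars.lower b))

-- ===== VERDICT (by name: the statement is the Claim_ definition above) =====
theorem match_game_to_bet_spec : Claim_equal_match_game_to_bet := by
  intro e b _ _
  unfold Spec_match_game_to_bet match_game_to_bet match_game_to_bet_alt
  simp only [pvExtract_eq, pvFallback_eq]
  rcases pvSchools e.toList with _ | s1 <;>
    rcases pvSchools b.toList with _ | s2 <;> simp
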